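-- pv_equiv track=rewrite | github.com/MikeChile13/Leet_Codes | 1524-string-matching-in-an-array/1524-string-matching-in-an-array.py | stringMatching
-- ===== SOURCE A (Python) =====
-- from typing import List
--
-- def stringMatching(words: List[str]) -> List[str]:
--     ans = []
--     n = len(words)
--     wordset = set(words)
--
--     def find_substrings(word) -> None:
--         for i in range(len(word)):
--             current = ''
--             for j in range(i,len(word)):
--                 current+=word[j]
--                 if current in wordset and len(current) < len(word):
--                     ans.append(current)
--                     wordset.remove(current)
--     for i in range(n):
--         if words[i] in wordset:
--             find_substrings(words[i])
--
--     return ans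
-- ===== SOURCE B (Python) =====
-- from typing import List
--
-- def stringMatching(words: List[str]) -> List[str]:
--     ans = []
--     remaining = set(words)
--     for w in words:
--         if w in remaining:
--             for i in range(len(w)):
--                 tail = w[i:]
--                 for c in sorted((c for c in remaining
--                                  if 0 < len(c) < len(w) and tail.startswith(c)), key=len):
--                     ans.append(c)
--                     remaining.remove(c)
--     return ans
-- ===== Notes on version B (the rewrite author's own statement) =====
-- stated objective: alternative
-- what changed: A enumerates every substring of each word character by character and tests it against the word set; B reverses the test direction: at each position of a word it scans the remaining nonempty shorter candidate words with startswith, appending matches shortest first and removing them from the set.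
import Mathlib
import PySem

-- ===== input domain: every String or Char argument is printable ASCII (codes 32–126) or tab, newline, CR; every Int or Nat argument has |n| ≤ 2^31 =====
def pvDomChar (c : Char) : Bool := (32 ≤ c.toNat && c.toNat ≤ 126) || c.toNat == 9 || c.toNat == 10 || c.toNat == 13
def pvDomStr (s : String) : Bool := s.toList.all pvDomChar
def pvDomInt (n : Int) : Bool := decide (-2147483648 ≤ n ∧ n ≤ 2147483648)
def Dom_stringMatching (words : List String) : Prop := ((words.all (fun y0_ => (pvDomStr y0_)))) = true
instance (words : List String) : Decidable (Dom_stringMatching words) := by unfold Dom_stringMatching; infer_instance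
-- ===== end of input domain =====

-- B reverses A's test direction: instead of enumerating every substring of a word and testing it
-- against the set, B scans, at each position of the word, the remaining candidate words with
-- startswith, taking shorter matches first (objective: alternative algorithm, similar cost).

-- ===== PORT A =====
-- Python str values are modelled on code points: `current` (built by `current += word[j]`) is a
-- List Char, word[j] is PySem.List.pyGet? on the word's code points ((·.toList) turns the Option
-- into [] or [c]; j is always in range), and `current in wordset` compares the packed String.
-- wordset.remove(current) is ported as Set.discard: the preceding `in` test guarantees membership,
-- so Python's KeyError is unreachable.
def pvInnerA (word : List Char) (i : Int) (st : List String × PySem.Set String) :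
    List String × PySem.Set String :=
  ((PySem.List.pyRange i word.length 1).foldl
    (fun (cs : List Char × (List String × PySem.Set String)) j =>
      let current := cs.1 ++ (PySem.List.pyGet? word j).toList
      if PySem.Set.contains cs.2.2 (String.ofList current) && decide (current.length < word.length) then
        (current, cs.2.1 ++ [(String.ofList current)], PySem.Set.discard cs.2.2 (String.ofList current))
      else
        (current, cs.2))
    ([], st)).2

def pvFindSubstrings (word : List Char) (st : List String × PySem.Set String) :
    List String × PySem.Set String :=
  (PySem.List.pyRange 0 word.length 1).foldl (fun st i => pvInnerA word i st) st

def stringMatching (words : List String) : List String :=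
  let n := PySem.List.len words
  let wordset := PySem.Set.ofList words
  ((PySem.List.pyRange 0 n 1).foldl
    (fun (st : List String × PySem.Set String) i =>
      let w := PySem.List.pyGetD words i ""
      if PySem.Set.contains st.2 w then pvFindSubstrings w.toList st else st)
    (([] : List String), wordset)).1

-- ===== PORT B =====
-- One position of B's scan: the remaining nonempty candidates that are shorter than w and start
-- at this position (tail.startswith) are appended shortest first and removed. Python iterates the
-- set in hash order, but sorted's key is tie-free here (two distinct prefixes of the same tail
-- cannot have equal length), so the sorted result is order-independent; the port filters the
-- Set's list. Python's chained '0 < len(c) < len(w)' is the conjunction of the two comparisons.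
def pvMatchesAt (w : String) (st : List String × PySem.Set String) (i : Int) :
    List String × PySem.Set String :=
  let tail := PySem.Str.slice w (some i) none
  (PySem.List.sorted
      (st.2.filter (fun c =>
        (decide (0 < PySem.Str.len c) && decide (PySem.Str.len c < PySem.Str.len w)) &&
          PySem.Str.startswith tail c))
      (fun c => PySem.Str.len c) false).foldl
    (fun (st : List String × PySem.Set String) c =>
      (st.1 ++ [c], PySem.Set.discard st.2 c)) st

def stringMatching_alt (words : List String) : List String :=
  (words.foldl
    (fun (st : List String × PySem.Set String) w =>
      if PySem.Set.contains st.2 w then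
        (PySem.List.pyRange 0 (PySem.Str.len w) 1).foldl (pvMatchesAt w) st
      else st)
    (([] : List String), PySem.Set.ofList words)).1

-- ===== PRECONDITION & SPEC =====
def Spec_stringMatching (words : List String) (out : List String) : Prop := out = stringMatching_alt words
instance (words : List String) (out : List String) : Decidable (Spec_stringMatching words out) := by unfold Spec_stringMatching; infer_instance

-- ===== CLAIM (what is proved, stated in full; the proofs are below) =====
def Claim_equal_stringMatching : Prop := ∀ (words : List String), Dom_stringMatching words → Spec_stringMatching words (stringMatching words)

-- ===== LEMMAS AND PROOFS =====

-- proof-layer abbreviations (used only by the proofs below)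

/-- substring word[i:i+l] as a list of code points -/
def pvSub (word : List Char) (i l : Nat) : List Char := (word.drop i).take l

/-- the step A's scan performs per enumerated substring -/
def pvStep (L : Nat) (st : List String × PySem.Set String) (c : List Char) :
    List String × PySem.Set String :=
  if PySem.Set.contains st.2 (String.ofList c) && decide (c.length < L) then
    (st.1 ++ [String.ofList c], PySem.Set.discard st.2 (String.ofList c))
  else st

/-- A's scan order for start index i: lengths 1 .. L-i -/
def pvPL (word : List Char) (i : Nat) : List (List Char) :=
  (List.range (word.length - i)).map (fun k => pvSub word i (k + 1))

/-- the strings A appends while scanning P against set S, in order -/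
def pvOut (L : Nat) (S : PySem.Set String) (P : List (List Char)) : List String :=
  PySem.Set.ofList
    ((P.filter (fun c => PySem.Set.contains S (String.ofList c) && decide (c.length < L))).map
      String.ofList)

/-- B's per-position hit list, in clean form -/
def pvHits (w : List Char) (i : Nat) (S : PySem.Set String) : List String :=
  PySem.List.sorted
    (S.filter (fun c => ((decide (0 < c.toList.length) && decide (c.toList.length < w.length)) &&
      decide (c.toList <+: w.drop i))))
    (fun c => (c.toList.length : Int)) false

theorem pvOfListFilterNe {α : Type} [BEq α] [LawfulBEq α] (x : α) :
    ∀ (l : List α),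
      PySem.Set.ofList (l.filter (fun y => !(y == x))) =
        PySem.Set.discard (PySem.Set.ofList l) x := by
  intro l
  induction l with
  | nil => rfl
  | cons y l ih =>
    by_cases hyx : y = x
    · subst hyx
      rw [show List.filter (fun z => !z == y) (y :: l) = List.filter (fun z => !z == y) l by simp]
      rw [ih, PySem.Set.ofList_cons]
      simp [PySem.Set.discard, List.filter_filter]
    · have hbe : (y == x) = false := by simp [hyx]
      rw [show List.filter (fun y => !y == x) (y :: l) = y :: List.filter (fun y => !y == x) l by
        simp [hbe]]
      rw [PySem.Set.ofList_cons, PySem.Set.ofList_cons, ih]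
      simp only [PySem.Set.discard, List.filter_filter]
      rw [List.filter_cons]
      simp only [hbe, Bool.not_false, if_pos, List.filter_filter]
      congr 1
      apply List.filter_congr
      intro a _
      rw [Bool.and_comm]

theorem pvDiffNil (S : PySem.Set String) : PySem.Set.diff S [] = S := by
  simp [PySem.Set.diff]

theorem pvContainsEq (Y : PySem.Set String) (b : String) :
    PySem.Set.contains Y b = decide (b ∈ Y) := by
  rw [Bool.eq_iff_iff]
  simp

theorem pvDiffDiscard (S : PySem.Set String) (s : String) (X : List String) :
    PySem.Set.diff (PySem.Set.discard S s) X = PySem.Set.diff S (s :: X) := by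
  simp only [PySem.Set.diff, PySem.Set.discard, List.filter_filter]
  apply List.filter_congr
  intro a _
  simp only [pvContainsEq, List.mem_cons]
  by_cases h1 : a ∈ X <;> by_cases h2 : a = s <;> simp [h1, h2]

theorem pvScanFold (L : Nat) :
    ∀ (P : List (List Char)) (a : List String) (S : PySem.Set String), S.Nodup →
      P.foldl (pvStep L) (a, S) =
        (a ++ pvOut L S P, PySem.Set.diff S (pvOut L S P)) := by
  intro P
  induction P with
  | nil =>
    intro a S hS
    simp [pvOut, pvDiffNil]
  | cons c P ih =>
    intro a S hS
    set s := String.ofList c with hs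
    rw [List.foldl_cons]
    by_cases hq : (PySem.Set.contains S s && decide (c.length < L)) = true
    · have hstep : pvStep L (a, S) c = (a ++ [s], PySem.Set.discard S s) := by
        simp only [pvStep]
        rw [← hs, if_pos hq]
      have hfilt : P.filter
            (fun c' => PySem.Set.contains (PySem.Set.discard S s) (String.ofList c') &&
              decide (c'.length < L))
          = (P.filter (fun c' => PySem.Set.contains S (String.ofList c') &&
              decide (c'.length < L))).filter (fun c' => !(String.ofList c' == s)) := by
        rw [List.filter_filter]
        apply List.filter_congr
        intro c' _
        simp only [pvContainsEq, PySem.Set.mem_discard]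
        by_cases h1 : String.ofList c' ∈ S <;> by_cases h2 : String.ofList c' = s <;>
          by_cases h3 : c'.length < L <;> simp [h1, h2, h3]
      have hout : pvOut L S (c :: P) = s :: pvOut L (PySem.Set.discard S s) P := by
        simp only [pvOut, List.filter_cons, ← hs, hq, if_pos, List.map_cons,
          PySem.Set.ofList_cons, hfilt]
        congr 1
        rw [← pvOfListFilterNe s, List.filter_map]
        rfl
      rw [hstep, ih _ _ (PySem.Set.nodup_discard _ _ hS), hout, pvDiffDiscard]
      simp
    · have hstep : pvStep L (a, S) c = (a, S) := by
        simp only [pvStep]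
        rw [← hs, if_neg hq]
      have hout : pvOut L S (c :: P) = pvOut L S P := by
        simp only [pvOut, List.filter_cons, ← hs]
        rw [if_neg hq]
      rw [hstep, ih _ _ hS, hout]

theorem pvInnerA_eq (word : List Char) (iN : Nat) (hi : iN ≤ word.length)
    (st : List String × PySem.Set String) :
    pvInnerA word (iN : Int) st = (pvPL word iN).foldl (pvStep word.length) st := by
  have go : ∀ (n t : Nat), t + n = word.length → iN ≤ t →
      ∀ (st : List String × PySem.Set String),
        ((PySem.List.pyRange (t : Int) word.length 1).foldl
          (fun (cs : List Char × (List String × PySem.Set String)) j =>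
            let current := cs.1 ++ (PySem.List.pyGet? word j).toList
            if PySem.Set.contains cs.2.2 (String.ofList current) &&
                decide (current.length < word.length) then
              (current, cs.2.1 ++ [String.ofList current],
                PySem.Set.discard cs.2.2 (String.ofList current))
            else (current, cs.2))
          (pvSub word iN (t - iN), st)).2
        = ((List.range n).map (fun k => pvSub word iN (t - iN + k + 1))).foldl
            (pvStep word.length) st := by
    intro n
    induction n with
    | zero =>
      intro t ht hit st
      rw [PySem.List.pyRange_one_eq_nil (Int.ofNat_le.mpr (by omega))]
      simp
    | succ n ih =>
      intro t ht hit st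
      have htL : t < word.length := by omega
      have hcur : pvSub word iN (t - iN) ++ (PySem.List.pyGet? word (t : Int)).toList
          = pvSub word iN (t - iN + 1) := by
        rw [PySem.List.pyGet?_natCast, pvSub, pvSub, List.take_add_one, List.getElem?_drop]
        have : iN + (t - iN) = t := by omega
        rw [this]
      have hstepeq : ∀ (st : List String × PySem.Set String) (c : List Char),
          (if PySem.Set.contains st.2 (String.ofList c) && decide (c.length < word.length) then
            (c, st.1 ++ [String.ofList c], PySem.Set.discard st.2 (String.ofList c))
          else (c, st))
          = (c, pvStep word.length st c) := by
        intro st c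
        by_cases h : String.ofList c ∈ st.2 ∧ c.length < word.length <;> simp [pvStep, h]
      rw [PySem.List.pyRange_one_cons (by exact_mod_cast htL)]
      simp only [List.foldl_cons]
      rw [hcur, hstepeq]
      rw [List.range_succ_eq_map, List.map_cons, List.map_map, List.foldl_cons]
      simp only [Nat.add_zero]
      rw [show ((t : Int) + 1) = ((t + 1 : Nat) : Int) by push_cast; ring]
      rw [show t - iN + 1 = t + 1 - iN from by omega]
      rw [List.map_congr_left (f := (fun k => pvSub word iN (t - iN + k + 1)) ∘ Nat.succ)
        (g := fun k => pvSub word iN (t + 1 - iN + k + 1))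
        (by intro k _; simp only [Function.comp]; congr 1; omega)]
      exact ih (t + 1) (by omega) (by omega) _
  have h0 : ([] : List Char) = pvSub word iN (iN - iN) := by simp [pvSub]
  show ((PySem.List.pyRange (iN : Int) word.length 1).foldl _ ([], st)).2 = _
  rw [h0, go (word.length - iN) iN (by omega) le_rfl st]
  unfold pvPL
  rw [List.map_congr_left (g := fun k => pvSub word iN (k + 1)) (by intro k _; congr 1; omega)]

-- ===== B-side basics =====

theorem pvAppendFold :
    ∀ (xs : List String) (st : List String × PySem.Set String),
      xs.foldl (fun st c => (st.1 ++ [c], PySem.Set.discard st.2 c)) st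
        = (st.1 ++ xs, PySem.Set.diff st.2 xs) := by
  intro xs
  induction xs with
  | nil => intro st; simp [pvDiffNil]
  | cons x xs ih =>
    intro st
    rw [List.foldl_cons, ih]
    simp only
    rw [pvDiffDiscard]
    simp

theorem pvMemPL (word : List Char) (i : Nat) (c : List Char) :
    c ∈ pvPL word i ↔ c ≠ [] ∧ c <+: word.drop i := by
  simp only [pvPL, List.mem_map, List.mem_range]
  constructor
  · rintro ⟨k, hk, rfl⟩
    have hlen : (pvSub word i (k + 1)).length = k + 1 := by
      simp [pvSub]
      omega
    refine ⟨fun hnil => by simp [hnil] at hlen, ?_⟩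
    exact List.take_prefix _ _
  · rintro ⟨hne, hpre⟩
    have hc : 1 ≤ c.length := List.length_pos_of_ne_nil hne
    have hle : c.length ≤ word.length - i := by
      have h := hpre.length_le
      rw [List.length_drop] at h
      exact h
    refine ⟨c.length - 1, by omega, ?_⟩
    rw [pvSub, show c.length - 1 + 1 = c.length from by omega]
    exact (List.prefix_iff_eq_take.1 hpre).symm

theorem pvPLPairwise (word : List Char) (i : Nat) :
    (pvPL word i).Pairwise (fun c d => c.length < d.length) := by
  unfold pvPL
  refine List.pairwise_map.2 (List.Pairwise.imp_of_mem ?_ List.pairwise_lt_range)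
  intro k k' hk hk' hkk
  simp only [pvSub, List.length_take, List.length_drop]
  have := List.mem_range.1 hk
  have := List.mem_range.1 hk'
  omega

/-- A's per-position output list equals B's per-position hit list. -/
theorem pvPosList (word : List Char) (i : Nat) (S : PySem.Set String) (hS : S.Nodup) :
    pvOut word.length S (pvPL word i) = pvHits word i S := by
  set L := word.length with hL
  set d := word.drop i with hd
  set p : List Char → Bool :=
    fun c => PySem.Set.contains S (String.ofList c) && decide (c.length < L) with hp
  set X := ((pvPL word i).filter p).map String.ofList with hX
  have hXpair : X.Pairwise (fun u v => (u.toList.length : Int) < (v.toList.length : Int)) := by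
    refine List.pairwise_map.2 (((pvPLPairwise word i).filter p).imp ?_)
    intro c c' h
    simp only [String.toList_ofList]
    exact_mod_cast h
  have hXnodup : X.Nodup := by
    refine hXpair.imp ?_
    intro u v h heq
    rw [heq] at h
    exact lt_irrefl _ h
  have hofX : pvOut L S (pvPL word i) = X := by
    rw [pvOut, ← hp, ← hX]
    exact PySem.Set.ofList_eq_self_of_nodup X hXnodup
  have hmemX : ∀ s, s ∈ X ↔ s ∈ S ∧ (0 < s.toList.length ∧ s.toList.length < L) ∧
      s.toList <+: d := by
    intro s
    simp only [hX, List.mem_map, List.mem_filter, hp, Bool.and_eq_true, decide_eq_true_eq,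
      PySem.Set.contains_iff, pvMemPL]
    constructor
    · rintro ⟨c, ⟨⟨hcne, hcpre⟩, hcS, hclen⟩, rfl⟩
      rw [String.toList_ofList]
      exact ⟨hcS, ⟨List.length_pos_of_ne_nil hcne, hclen⟩, hcpre⟩
    · rintro ⟨hsS, ⟨hspos, hslen⟩, hspre⟩
      have hnil : s.toList ≠ [] := List.ne_nil_of_length_pos hspos
      exact ⟨s.toList, ⟨⟨hnil, hspre⟩, by rwa [String.ofList_toList], by exact hslen⟩,
        String.ofList_toList⟩
  have hFnodup : (S.filter (fun c =>
      (decide (0 < c.toList.length) && decide (c.toList.length < L)) &&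
        decide (c.toList <+: d))).Nodup := hS.filter _
  have hperm : X.Perm (S.filter (fun c =>
      (decide (0 < c.toList.length) && decide (c.toList.length < L)) &&
        decide (c.toList <+: d))) := by
    refine (List.perm_ext_iff_of_nodup hXnodup hFnodup).2 ?_
    intro s
    rw [hmemX s, List.mem_filter]
    simp only [Bool.and_eq_true, decide_eq_true_eq]
  rw [hofX, pvHits, ← hd, ← hL]
  exact (PySem.List.sorted_eq_of_perm_of_pairwise_lt _ _ _ hperm hXpair).symm

/-- B's per-position step, reduced to the clean hit list. -/
theorem pvMatchesAt_eq (w : String) (i : Nat) (a : List String) (S : PySem.Set String) :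
    pvMatchesAt w (a, S) (i : Int) = (a ++ pvHits w.toList i S,
      PySem.Set.diff S (pvHits w.toList i S)) := by
  have hpred : (fun c => (decide (0 < PySem.Str.len c) &&
          decide (PySem.Str.len c < PySem.Str.len w)) &&
        PySem.Str.startswith (PySem.Str.slice w (some (i : Int)) none) c)
      = (fun c => (decide (0 < c.toList.length) && decide (c.toList.length < w.toList.length)) &&
        decide (c.toList <+: w.toList.drop i)) := by
    funext c
    have h0 : decide (0 < PySem.Str.len c) = decide (0 < c.toList.length) := by
      simp [PySem.Str.len_eq]
    have h1 : decide (PySem.Str.len c < PySem.Str.len w)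
        = decide (c.toList.length < w.toList.length) := by
      simp [PySem.Str.len_eq]
    have h2 : PySem.Str.startswith (PySem.Str.slice w (some (i : Int)) none) c
        = decide (c.toList <+: w.toList.drop i) := by
      rw [PySem.Str.startswith_eq, Bool.eq_iff_iff, PySem.Chars.startswith_iff,
        PySem.Str.toList_slice, PySem.Chars.slice_eq_listSlice, PySem.List.slice_from_natCast]
      simp
    rw [h0, h1, h2]
  have hkey : (fun c : String => PySem.Str.len c) = (fun c : String => (c.toList.length : Int)) := by
    funext c
    exact PySem.Str.len_eq c
  show (PySem.List.sorted _ _ false).foldl _ (a, S) = _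
  rw [hpred, hkey]
  rw [pvAppendFold]
  rfl

/-- per-word equality of the position folds, with the set invariants carried along. -/
theorem pvPerWordGo (w : String) :
    ∀ (js : List Nat), (∀ j ∈ js, j < w.toList.length) →
      ∀ (a : List String) (S : PySem.Set String), S.Nodup →
      js.foldl (fun st (k : Nat) => pvInnerA w.toList (k : Int) st) (a, S)
          = js.foldl (fun st (k : Nat) => pvMatchesAt w st (k : Int)) (a, S)
        ∧ (js.foldl (fun st (k : Nat) => pvInnerA w.toList (k : Int) st) (a, S)).2.Nodup
        ∧ (∀ c ∈ (js.foldl (fun st (k : Nat) => pvInnerA w.toList (k : Int) st) (a, S)).2, c ∈ S) := by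
  intro js
  induction js with
  | nil =>
    intro _ a S hS
    exact ⟨rfl, hS, fun c hc => hc⟩
  | cons j js ih =>
    intro hbd a S hS
    have hj : j < w.toList.length := hbd j List.mem_cons_self
    have hstepA : pvInnerA w.toList (j : Int) (a, S)
        = (a ++ pvHits w.toList j S, PySem.Set.diff S (pvHits w.toList j S)) := by
      rw [pvInnerA_eq w.toList j (le_of_lt hj), pvScanFold w.toList.length _ a S hS,
        pvPosList w.toList j S hS]
    have hS' : (PySem.Set.diff S (pvHits w.toList j S)).Nodup := hS.filter _
    obtain ⟨he, hn, hm⟩ := ih (fun j' hj' => hbd j' (List.mem_cons_of_mem _ hj'))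
      (a ++ pvHits w.toList j S) (PySem.Set.diff S (pvHits w.toList j S)) hS'
    simp only [List.foldl_cons]
    rw [hstepA, pvMatchesAt_eq]
    exact ⟨he, hn, fun c hc => ((PySem.Set.mem_diff _ _ _).1 (hm c hc)).1⟩

/-- A's per-word processing equals B's, and the set invariants are preserved. -/
theorem pvPerWord (w : String) (a : List String) (S : PySem.Set String) (hS : S.Nodup) :
    pvFindSubstrings w.toList (a, S)
        = (PySem.List.pyRange 0 (PySem.Str.len w) 1).foldl (pvMatchesAt w) (a, S)
      ∧ (pvFindSubstrings w.toList (a, S)).2.Nodup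
      ∧ (∀ c ∈ (pvFindSubstrings w.toList (a, S)).2, c ∈ S) := by
  have hA : pvFindSubstrings w.toList (a, S)
      = (List.range w.toList.length).foldl (fun st (k : Nat) => pvInnerA w.toList (k : Int) st) (a, S) := by
    unfold pvFindSubstrings
    rw [PySem.List.pyRange_zero_nat]
    exact List.foldl_map
  have hB : (PySem.List.pyRange 0 (PySem.Str.len w) 1).foldl (pvMatchesAt w) (a, S)
      = (List.range w.toList.length).foldl (fun st (k : Nat) => pvMatchesAt w st (k : Int)) (a, S) := by
    rw [PySem.Str.len_eq, PySem.List.pyRange_zero_nat]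
    exact List.foldl_map
  obtain ⟨he, hn, hm⟩ := pvPerWordGo w (List.range w.toList.length)
    (fun j hj => List.mem_range.1 hj) a S hS
  rw [hA, hB]
  exact ⟨he, hn, hm⟩

-- ===== VERDICT (by name: the statement is the Claim_ definition above) =====
theorem stringMatching_spec : Claim_equal_stringMatching := by
  intro words _
  unfold Spec_stringMatching
  have go : ∀ (ws : List String) (st : List String × PySem.Set String), st.2.Nodup →
      ws.foldl (fun st w =>
        if PySem.Set.contains st.2 w then pvFindSubstrings w.toList st else st) st
      = ws.foldl (fun st w =>
          if PySem.Set.contains st.2 w then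
            (PySem.List.pyRange 0 (PySem.Str.len w) 1).foldl (pvMatchesAt w) st
          else st) st := by
    intro ws
    induction ws with
    | nil => intro st _; rfl
    | cons w ws ih =>
      intro st hS
      rcases st with ⟨a, S⟩
      simp only [List.foldl_cons]
      by_cases hg : PySem.Set.contains S w = true
      · obtain ⟨he, hn, hm⟩ := pvPerWord w a S hS
        rw [if_pos hg, if_pos hg, ← he]
        exact ih _ hn
      · rw [if_neg hg, if_neg hg]
        exact ih (a, S) hS
  show stringMatching words = stringMatching_alt words
  simp only [stringMatching, stringMatching_alt]
  rw [PySem.List.foldl_pyRange_pyGetD words ""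
    (fun st w => if PySem.Set.contains st.2 w then pvFindSubstrings w.toList st else st)
    (([] : List String), PySem.Set.ofList words) (le_refl 0)]
  simp only [Int.toNat_zero, List.drop_zero]
  rw [go words _ (PySem.Set.nodup_ofList words)]
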